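-- pv_equiv track=rewrite | github.com/moscarce/python_projects | class_activity_2/create_in_tuple.py | create_tuple
-- ===== SOURCE A (Python) =====
-- def create_tuple(lst: list, lst2: list) -> list:
--     output = []
--     length = len(lst)
--     if length > len(lst2):
--         length = len(lst2)
--     for index in range(length):
--         output.append((lst[index], lst2[index]))
--     for index in range(length,len(lst)):
--         output.append((lst[index],))
--     for index in range(length,len(lst2)):
--         output.append((lst2[index],))
--     return output
-- ===== SOURCE B (Python) =====
-- def create_tuple(lst: list, lst2: list) -> list:
--     # Single padded-pair pass: draw one element from each iterator, pad the
--     # exhausted side with a fresh sentinel, and keep the non-sentinel parts.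
--     sentinel = object()
--     it1, it2 = iter(lst), iter(lst2)
--     out = []
--     while True:
--         a = next(it1, sentinel)
--         b = next(it2, sentinel)
--         if a is sentinel and b is sentinel:
--             return out
--         out.append(tuple(x for x in (a, b) if x is not sentinel))
-- ===== Notes on version B (the rewrite author's own statement) =====
-- stated objective: idiomatic
-- what changed: Replaces A's min-length computation and three sequential index loops with one padded-pair pass over both iterators, filtering a fresh sentinel out of each pair.
import Mathlib
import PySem

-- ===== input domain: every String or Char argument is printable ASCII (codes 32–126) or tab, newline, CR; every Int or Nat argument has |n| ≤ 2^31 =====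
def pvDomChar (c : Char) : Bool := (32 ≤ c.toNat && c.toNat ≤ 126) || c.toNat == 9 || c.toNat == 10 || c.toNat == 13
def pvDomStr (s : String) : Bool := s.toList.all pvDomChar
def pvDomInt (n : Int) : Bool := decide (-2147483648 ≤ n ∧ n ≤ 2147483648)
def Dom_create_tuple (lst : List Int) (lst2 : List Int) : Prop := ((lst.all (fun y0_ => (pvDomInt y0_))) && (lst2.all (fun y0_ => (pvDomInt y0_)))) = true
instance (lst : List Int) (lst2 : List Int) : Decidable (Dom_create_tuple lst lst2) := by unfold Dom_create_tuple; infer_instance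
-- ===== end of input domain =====

-- B makes one padded-pair pass over both lists instead of A's min-length computation and three index loops; objective: idiomatic.

-- ===== PORT A =====
-- literal port of A: min length, then three index loops appending to `output`
def create_tuple (lst : List Int) (lst2 : List Int) : List (List Int) :=
  let length := if lst.length > lst2.length then lst2.length else lst.length
  let output : List (List Int) := []
  -- indices in all three loops are in range, so `getD _ 0` is exact here
  let output := (List.range' 0 length).foldl
    (fun out i => out ++ [[lst.getD i 0, lst2.getD i 0]]) output
  let output := (List.range' length (lst.length - length)).foldl
    (fun out i => out ++ [[lst.getD i 0]]) output
  (List.range' length (lst2.length - length)).foldl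
    (fun out i => out ++ [[lst2.getD i 0]]) output

-- ===== PORT B =====
-- B's loop: each iteration pops one head from each remaining list (none = sentinel)
-- and appends the non-sentinel parts; it stops when both are exhausted.
def create_tuple_alt : List Int → List Int → List (List Int)
  | [], [] => []
  | [], y :: ys => [y] :: create_tuple_alt [] ys
  | x :: xs, [] => [x] :: create_tuple_alt xs []
  | x :: xs, y :: ys => [x, y] :: create_tuple_alt xs ys

-- ===== PRECONDITION & SPEC =====
def Spec_create_tuple (lst : List Int) (lst2 : List Int) (out : List (List Int)) : Prop := out = create_tuple_alt lst lst2
instance (lst : List Int) (lst2 : List Int) (out : List (List Int)) : Decidable (Spec_create_tuple lst lst2 out) := by unfold Spec_create_tuple; infer_instance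

-- ===== CLAIM (what is proved, stated in full; the proofs are below) =====
def Claim_equal_create_tuple : Prop := ∀ (lst : List Int) (lst2 : List Int), Dom_create_tuple lst lst2 → Spec_create_tuple lst lst2 (create_tuple lst lst2)

-- ===== LEMMAS AND PROOFS =====

-- appending-fold is a map
theorem pv_foldl_app {α β : Type} (f : α → β) :
    ∀ (l : List α) (acc : List β),
      l.foldl (fun out i => out ++ [f i]) acc = acc ++ l.map f := by
  intro l
  induction l with
  | nil => simp
  | cons a t ih => intro acc; simp [List.foldl, ih]

theorem pv_range'_shift {α : Type} (f : ℕ → α) :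
    ∀ (n s : ℕ), (List.range' (s + 1) n).map f = (List.range' s n).map (fun i => f (i + 1)) := by
  intro n
  induction n with
  | zero => simp
  | succ m ih => intro s; simp [List.range'_succ, ih]

-- the tail loops read `l.drop m`
theorem pv_range'_getD (l : List Int) :
    ∀ (m : ℕ), (List.range' m (l.length - m)).map (fun i => l.getD i 0) = l.drop m := by
  induction l with
  | nil => intro m; simp
  | cons x xs ih =>
    intro m
    cases m with
    | zero =>
      simp only [List.length_cons, Nat.sub_zero, List.range'_succ, List.map_cons, List.drop_zero]
      rw [pv_range'_shift]
      simpa using ih 0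
    | succ m' =>
      simp only [List.length_cons, Nat.succ_sub_succ, List.drop_succ_cons]
      rw [pv_range'_shift]
      simpa using ih m'

-- the first loop reads the zip of the two lists
theorem pv_range'_zip :
    ∀ (xs ys : List Int),
      (List.range' 0 (min xs.length ys.length)).map (fun i => [xs.getD i 0, ys.getD i 0])
        = List.zipWith (fun a b => [a, b]) xs ys := by
  intro xs
  induction xs with
  | nil => intro ys; simp
  | cons x xs ih =>
    intro ys
    cases ys with
    | nil => simp
    | cons y ys =>
      simp only [List.length_cons, Nat.succ_min_succ, List.range'_succ, List.map_cons,
        List.zipWith_cons_cons]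
      rw [pv_range'_shift]
      simpa using ih ys

-- closed form for port A
theorem pv_A_eq (lst lst2 : List Int) :
    create_tuple lst lst2 =
      List.zipWith (fun a b => [a, b]) lst lst2
        ++ ((lst.drop (min lst.length lst2.length)).map (fun x => [x]))
        ++ ((lst2.drop (min lst.length lst2.length)).map (fun y => [y])) := by
  unfold create_tuple
  have hm : (if lst.length > lst2.length then lst2.length else lst.length)
      = min lst.length lst2.length := by
    simp only [gt_iff_lt]
    split <;> omega
  rw [hm, pv_foldl_app, pv_foldl_app, pv_foldl_app]
  rw [pv_range'_zip]
  rw [show (fun i => [lst.getD i 0]) = (fun x => [x]) ∘ (fun i => lst.getD i 0) from rfl,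
    show (fun i => [lst2.getD i 0]) = (fun x => [x]) ∘ (fun i => lst2.getD i 0) from rfl]
  rw [← List.map_map, ← List.map_map, pv_range'_getD, pv_range'_getD]
  simp [List.append_assoc]

theorem pv_B_nil_left : ∀ ys : List Int, create_tuple_alt [] ys = ys.map (fun y => [y]) := by
  intro ys
  induction ys with
  | nil => simp [create_tuple_alt]
  | cons y t ih => simp [create_tuple_alt, ih]

theorem pv_B_nil_right : ∀ xs : List Int, create_tuple_alt xs [] = xs.map (fun x => [x]) := by
  intro xs
  induction xs with
  | nil => simp [create_tuple_alt]
  | cons x t ih => simp [create_tuple_alt, ih]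

-- closed form for port B
theorem pv_B_eq :
    ∀ (lst lst2 : List Int),
      create_tuple_alt lst lst2 =
        List.zipWith (fun a b => [a, b]) lst lst2
          ++ ((lst.drop (min lst.length lst2.length)).map (fun x => [x]))
          ++ ((lst2.drop (min lst.length lst2.length)).map (fun y => [y])) := by
  intro lst
  induction lst with
  | nil => intro lst2; simp [pv_B_nil_left]
  | cons x xs ih =>
    intro lst2
    cases lst2 with
    | nil => simp [pv_B_nil_right]
    | cons y ys =>
      simp only [create_tuple_alt, List.zipWith_cons_cons, List.length_cons,
        Nat.succ_min_succ, List.drop_succ_cons, List.cons_append]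
      rw [ih ys]

-- ===== VERDICT (by name: the statement is the Claim_ definition above) =====
theorem create_tuple_spec : Claim_equal_create_tuple := by
  intro lst lst2 _
  unfold Spec_create_tuple
  rw [pv_A_eq, pv_B_eq]
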